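-- pv_equiv track=rewrite | github.com/RadNuke101/OpenAI_Tests | results/39060015/39060015.sl.20240315010713.py | delete_enclosed
-- ===== SOURCE A (Python) =====
-- def delete_enclosed(input_list):
--     output_list = []
--     for sublist in input_list:
--         new_sublist = ''
--         for item in sublist:
--             start = item.find('/')
--             while start != -1:
--                 end = item.find('/', start + 1)
--                 item = item[:start] + item[end + 1:]
--                 start = item.find('/')
--             new_sublist += item
--         output_list.append(new_sublist)
--     return output_list
-- ===== SOURCE B (Python) =====
-- def delete_enclosed(input_list):
--     output_list = []
--     for sublist in input_list:
--         parts = []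
--         for item in sublist:
--             inside = False
--             buf = []
--             for ch in item:
--                 if ch == '/':
--                     inside = not inside
--                 elif not inside:
--                     buf.append(ch)
--             parts.append(''.join(buf))
--         output_list.append(''.join(parts))
--     return output_list
-- ===== Notes on version B (the rewrite author's own statement) =====
-- stated objective: alternative
-- what changed: Replaces A's repeated find-and-splice while loop (rescan the string for '/', cut out the pair, rebuild, repeat) with a single left-to-right pass per item that toggles an inside-slash flag and keeps only characters outside slash pairs.
-- outside the precondition, e.g. on delete_enclosed([['a/b']]): A does not finish within the time limit, B returns ['a']
import Mathlib
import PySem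

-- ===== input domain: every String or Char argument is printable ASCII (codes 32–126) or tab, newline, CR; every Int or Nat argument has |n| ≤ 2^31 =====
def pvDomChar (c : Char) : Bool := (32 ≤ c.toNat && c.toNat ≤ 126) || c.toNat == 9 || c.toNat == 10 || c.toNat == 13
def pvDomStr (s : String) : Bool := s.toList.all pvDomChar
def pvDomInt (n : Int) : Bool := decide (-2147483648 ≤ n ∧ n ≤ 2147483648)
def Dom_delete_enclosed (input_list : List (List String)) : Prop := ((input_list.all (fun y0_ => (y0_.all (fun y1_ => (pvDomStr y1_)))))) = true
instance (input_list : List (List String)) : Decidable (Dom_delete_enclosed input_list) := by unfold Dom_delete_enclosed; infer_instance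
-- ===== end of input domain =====

-- B replaces A's repeated find-and-splice rescans with one linear pass per item
-- toggling an inside-slash flag (a different algorithm of comparable measured cost).

-- ===== PORT A =====
-- A's inner 'while start != -1' loop; fuel bounds the iterations: inside Pre_
-- (even '/'-count) every pass removes exactly two slashes, so fuel = the item's
-- '/'-count never runs out and the port is exact there.
def pvStripLoopA (fuel : Nat) (item : List Char) : List Char :=
  match fuel with
  | 0 => item
  | fuel + 1 =>
    let start := PySem.Chars.find item ['/']
    if start = -1 then item
    else
      let e := PySem.Chars.findFrom item ['/'] (start + 1) none
      pvStripLoopA fuel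
        (PySem.Chars.slice item none (some start) ++ PySem.Chars.slice item (some (e + 1)) none)

def pvStripItemA (item : List Char) : List Char :=
  pvStripLoopA (item.count '/') item

def delete_enclosed (input_list : List (List String)) : List String :=
  input_list.foldl
    (fun output_list sublist =>
      output_list ++
        [String.mk (sublist.foldl (fun new_sublist item => new_sublist ++ pvStripItemA item.toList) [])])
    []

-- ===== PORT B =====
-- one pass with (inside-flag, kept-chars) state, as in Source B's inner loop
def pvKeepB (item : List Char) : List Char :=
  (item.foldl
    (fun (st : Bool × List Char) ch =>
      if ch = '/' then (!st.1, st.2)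
      else if st.1 then st
      else (st.1, st.2 ++ [ch]))
    (false, [])).2

def delete_enclosed_alt (input_list : List (List String)) : List String :=
  input_list.map (fun sublist => String.mk ((sublist.map (fun item => pvKeepB item.toList)).flatten))

-- ===== PRECONDITION & SPEC =====
-- Pre_ excludes any input containing an item with an odd number of '/' characters:
-- on such items A's while loop never terminates (find('/') with no closing slash
-- splices item[:start] + item, re-growing the string forever), so A returns nothing there.
def Pre_delete_enclosed (input_list : List (List String)) : Prop :=
  ∀ sublist ∈ input_list, ∀ item ∈ sublist, item.toList.count '/' % 2 = 0
instance (input_list : List (List String)) : Decidable (Pre_delete_enclosed input_list) := by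
  unfold Pre_delete_enclosed; infer_instance

def pvWitness_delete_enclosed : List (List String) := [["a/bb/c", "x"], ["/y/"], []]

def Spec_delete_enclosed (input_list : List (List String)) (out : List String) : Prop := out = delete_enclosed_alt input_list
instance (input_list : List (List String)) (out : List String) : Decidable (Spec_delete_enclosed input_list out) := by unfold Spec_delete_enclosed; infer_instance

-- ===== CLAIM (what is proved, stated in full; the proofs are below) =====
def Claim_equal_delete_enclosed : Prop := ∀ (input_list : List (List String)), Dom_delete_enclosed input_list → Pre_delete_enclosed input_list → Spec_delete_enclosed input_list (delete_enclosed input_list)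

-- ===== LEMMAS AND PROOFS =====

-- reference one-pass recursion (proof-side restatement of B's fold)
def pvAltRec : Bool → List Char → List Char
  | _, [] => []
  | b, c :: cs =>
    if c = '/' then pvAltRec (!b) cs
    else if b then pvAltRec b cs
    else c :: pvAltRec b cs

theorem pvKeepB_foldl (cs : List Char) :
    ∀ (b : Bool) (acc : List Char),
      (cs.foldl
        (fun (st : Bool × List Char) ch =>
          if ch = '/' then (!st.1, st.2)
          else if st.1 then st
          else (st.1, st.2 ++ [ch]))
        (b, acc)).2 = acc ++ pvAltRec b cs := by
  induction cs with
  | nil => intro b acc; simp [pvAltRec]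
  | cons c cs ih =>
    intro b acc
    by_cases hc : c = '/'
    · simp [hc, pvAltRec, ih]
    · by_cases hb : b = true
      · simp [hc, hb, pvAltRec, ih]
      · simp at hb
        simp [hc, hb, pvAltRec, ih]

theorem pvKeepB_eq (cs : List Char) : pvKeepB cs = pvAltRec false cs := by
  simp [pvKeepB, pvKeepB_foldl]

theorem pvAltRec_no_slash {u : List Char} (b : Bool) (h : '/' ∉ u) :
    pvAltRec b u = if b then [] else u := by
  induction u with
  | nil => cases b <;> simp [pvAltRec]
  | cons c cs ih =>
    simp at h
    cases b <;> simp [pvAltRec, h.1, Ne.symm h.1, ih h.2]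

theorem pvAltRec_append_no_slash {u : List Char} (b : Bool) (t : List Char) (h : '/' ∉ u) :
    pvAltRec b (u ++ t) = (if b then [] else u) ++ pvAltRec b t := by
  induction u with
  | nil => simp
  | cons c cs ih =>
    simp at h
    cases b <;> simp [pvAltRec, h.1, Ne.symm h.1, ih h.2]

theorem pv_singleton_prefix_iff (c : Char) (l : List Char) :
    [c] <+: l ↔ ∃ t, l = c :: t := by
  constructor
  · rintro ⟨t, ht⟩; exact ⟨t, by simpa using ht.symm⟩
  · rintro ⟨t, rfl⟩; exact ⟨t, rfl⟩

-- find s ['/'] = i ≥ 0 decomposes s as u ++ '/' :: v with u slash-free of length i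
theorem pv_find_decomp {s : List Char} {i : Int}
    (hfind : PySem.Chars.find s ['/'] = i) (hne : i ≠ -1) :
    ∃ u v, s = u ++ '/' :: v ∧ '/' ∉ u ∧ (u.length : Int) = i := by
  have h0 : 0 ≤ PySem.Chars.find s ['/'] := by
    have := PySem.Chars.neg_one_le_find s ['/']
    omega
  obtain ⟨hpre, hmin⟩ := PySem.Chars.find_spec (s := s) (sub := ['/']) h0
  rw [pv_singleton_prefix_iff] at hpre
  obtain ⟨v, hv⟩ := hpre
  set k := (PySem.Chars.find s ['/']).toNat with hk
  have hklen : k < s.length := by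
    by_contra hge
    push_neg at hge
    rw [List.drop_eq_nil_of_le hge] at hv
    simp at hv
  refine ⟨s.take k, v, ?_, ?_, ?_⟩
  · conv_lhs => rw [← List.take_append_drop k s, hv]
  · intro hmem
    obtain ⟨j, hj, hjc⟩ := List.getElem_of_mem (by simpa using hmem)
    obtain ⟨hjk, hjs⟩ : j < k ∧ j < s.length := by simpa using hj
    apply hmin j hjk
    rw [pv_singleton_prefix_iff]
    refine ⟨s.drop (j + 1), ?_⟩
    have hsj : s[j] = '/' := by simpa using hjc
    rw [List.drop_eq_getElem_cons hjs, hsj]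
  · have hlen : (s.take k).length = k := by simp [hklen.le]
    rw [hlen, hk, hfind, Int.toNat_of_nonneg (hfind ▸ h0)]

-- the invariant: one splice step of A's loop preserves the one-pass result,
-- and removes exactly two slashes
theorem pvStripLoopA_eq (n : Nat) :
    ∀ s : List Char, s.count '/' % 2 = 0 → s.count '/' ≤ n →
      pvStripLoopA n s = pvAltRec false s := by
  induction n with
  | zero =>
    intro s _ hle
    have h0 : s.count '/' = 0 := Nat.le_zero.mp hle
    have hnot : '/' ∉ s := by
      intro h
      have := List.count_pos_iff.mpr h
      omega
    simpa [pvStripLoopA] using (pvAltRec_no_slash false hnot).symm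
  | succ n ih =>
    intro s hpar hle
    by_cases hnone : PySem.Chars.find s ['/'] = -1
    · have hnot : ¬ ['/'] <:+: s := (PySem.Chars.find_eq_neg_one_iff s ['/']).mp hnone
      have hnm : '/' ∉ s := by
        intro hm
        obtain ⟨l, r, rfl⟩ := List.append_of_mem hm
        exact hnot ⟨l, r, by simp⟩
      simpa [pvStripLoopA, hnone] using (pvAltRec_no_slash false hnm).symm
    · obtain ⟨u, v, rfl, hu, hulen⟩ := pv_find_decomp rfl hnone
      set s := u ++ '/' :: v with hs
      have hcount : s.count '/' = v.count '/' + 1 := by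
        simp [hs, List.count_eq_zero_of_not_mem hu]
      -- second find: findFrom at (u.length+1), i.e. find inside v
      have hklen : u.length + 1 ≤ s.length := by simp [hs]
      have hdropk : s.drop (u.length + 1) = v := by
        rw [hs]; simp
      have hff := PySem.Chars.findFrom_natCast s ['/'] (u.length + 1) hklen
      rw [hdropk] at hff
      have hcast : ((u.length + 1 : Nat) : Int) = (u.length : Int) + 1 := by push_cast; ring
      rw [hcast] at hff
      have hvmem : '/' ∈ v := by
        by_contra hnv
        have := List.count_eq_zero_of_not_mem (a := '/') hnv
        omega
      have hfv_ne : PySem.Chars.find v ['/'] ≠ -1 := by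
        rw [Ne, PySem.Chars.find_eq_neg_one_iff]
        intro hni
        obtain ⟨l, r, rfl⟩ := List.append_of_mem hvmem
        exact hni ⟨l, r, by simp⟩
      obtain ⟨w, x, hvwx, hw, hwlen⟩ := pv_find_decomp (s := v) rfl hfv_ne
      have hv2 : v.count '/' = x.count '/' + 1 := by
        rw [hvwx, List.count_append, List.count_eq_zero_of_not_mem hw]
        simp
      -- the spliced string is u ++ x
      have hslice1 : PySem.Chars.slice s none (some ((u.length : Int))) = u := by
        rw [PySem.Chars.slice_eq_listSlice, PySem.List.slice_to_natCast]
        simp [hs]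
      have he1 : ((u.length : Int) + 1 + PySem.Chars.find v ['/'] + 1)
          = ((u.length + 1 + w.length + 1 : Nat) : Int) := by
        push_cast [← hwlen]; ring
      have hslice2 : PySem.Chars.slice s (some ((u.length : Int) + 1 + PySem.Chars.find v ['/'] + 1)) none = x := by
        rw [PySem.Chars.slice_eq_listSlice, he1, PySem.List.slice_from_natCast]
        have hdd : s.drop (u.length + 1 + w.length + 1) = (s.drop (u.length + 1)).drop (w.length + 1) := by
          rw [List.drop_drop]; congr 1
        rw [hdd, hdropk, hvwx]
        simp
      -- unfold one loop iteration
      have hstep : pvStripLoopA (n + 1) s = pvStripLoopA n (u ++ x) := by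
        rw [show pvStripLoopA (n + 1) s =
              (if PySem.Chars.find s ['/'] = -1 then s
               else pvStripLoopA n
                 (PySem.Chars.slice s none (some (PySem.Chars.find s ['/'])) ++
                  PySem.Chars.slice s
                    (some (PySem.Chars.findFrom s ['/'] (PySem.Chars.find s ['/'] + 1) none + 1)) none))
            from rfl]
        rw [if_neg hnone, ← hulen, hff, if_neg hfv_ne, hslice1, hslice2]
      -- counts of the spliced string
      have hxc : (u ++ x).count '/' = x.count '/' := by
        rw [List.count_append, List.count_eq_zero_of_not_mem hu]
        simp
      -- one-pass invariance under the splice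
      have hinv : pvAltRec false s = pvAltRec false (u ++ x) := by
        rw [hs, hvwx]
        rw [pvAltRec_append_no_slash false _ hu, pvAltRec_append_no_slash false _ hu]
        show u ++ pvAltRec false ('/' :: (w ++ '/' :: x)) = u ++ pvAltRec false x
        rw [show pvAltRec false ('/' :: (w ++ '/' :: x)) = pvAltRec true (w ++ '/' :: x) by
          simp [pvAltRec]]
        rw [pvAltRec_append_no_slash true _ hw]
        simp [pvAltRec]
      rw [hstep, ih (u ++ x) (by omega) (by omega), hinv]

theorem pvStripItemA_eq (item : List Char) (h : item.count '/' % 2 = 0) :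
    pvStripItemA item = pvKeepB item := by
  rw [pvKeepB_eq, pvStripItemA]
  exact pvStripLoopA_eq _ item h le_rfl

-- ===== VERDICT (by name: the statement is the Claim_ definition above) =====
theorem delete_enclosed_spec : Claim_equal_delete_enclosed := by
  intro input_list _ hpre
  unfold Spec_delete_enclosed delete_enclosed delete_enclosed_alt
  rw [PySem.List.foldl_append_singleton_eq_map]
  apply List.map_congr_left
  intro sublist hsl
  rw [PySem.List.foldl_append_eq_flatMap, List.flatMap_def]
  simp only [List.nil_append]
  congr 1
  congr 1
  apply List.map_congr_left
  intro item hit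
  exact pvStripItemA_eq _ (hpre sublist hsl item hit)
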